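-- pv_equiv track=rewrite | github.com/trenBarrow/self-play-posttraining-demo | tools/train/red_transcript.py | _compact_category
-- ===== SOURCE A (Python) =====
-- from typing import Any, Iterable, Mapping
--
-- def _text(value: Any) -> str | None:
--     if value is None:
--         return None
--     text = str(value).strip()
--     return text or None
--
-- def _compact_category(value: Any, default: str) -> str:
--     text = (_text(value) or default).strip().lower()
--     chars: list[str] = []
--     last_was_sep = False
--     for char in text:
--         if char.isalnum():
--             chars.append(char)
--             last_was_sep = False
--             continue
--         if not last_was_sep:
--             chars.append("_")
--             last_was_sep = True
--     compact = "".join(chars).strip("_")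
--     return compact or default
-- ===== SOURCE B (Python) =====
-- from itertools import groupby
--
-- def _compact_category(value, default):
--     stripped = str(value).strip() if value is not None else ""
--     text = (stripped or default).strip().lower()
--     parts = ["".join(run) if alnum else "_" for alnum, run in groupby(text, key=str.isalnum)]
--     compact = "".join(parts).strip("_")
--     return compact or default
-- ===== Notes on version B (the rewrite author's own statement) =====
-- stated objective: idiomatic
-- what changed: Replaces the char-by-char loop with a last_was_sep flag by splitting the lowercased text into maximal runs via itertools.groupby and mapping each run to itself or a single '_' before joining.
import Mathlib
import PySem

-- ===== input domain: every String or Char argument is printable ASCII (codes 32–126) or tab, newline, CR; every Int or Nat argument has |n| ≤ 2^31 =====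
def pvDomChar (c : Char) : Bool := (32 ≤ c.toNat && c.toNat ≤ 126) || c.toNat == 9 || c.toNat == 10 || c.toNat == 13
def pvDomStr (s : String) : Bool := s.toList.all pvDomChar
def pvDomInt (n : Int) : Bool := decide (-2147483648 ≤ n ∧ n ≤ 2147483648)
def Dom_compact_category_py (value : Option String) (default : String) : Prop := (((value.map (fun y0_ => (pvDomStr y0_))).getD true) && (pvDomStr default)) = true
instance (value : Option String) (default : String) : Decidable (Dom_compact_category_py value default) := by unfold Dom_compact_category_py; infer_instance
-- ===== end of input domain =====

-- B replaces A's char loop with a flag by splitting the text into maximal alnum/non-alnum runs (itertools.groupby) and joining each run or a single '_': idiomatic decomposition, same cost.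

-- ===== PORT A =====
def compact_category_py (value : Option String) (default : String) : String :=
  -- text = (_text(value) or default).strip().lower()
  let t0 : List Char :=
    match value with
    | none => default.toList
    | some s =>
      let st := PySem.Chars.strip s.toList
      if st = [] then default.toList else st
  let text := PySem.Chars.lower (PySem.Chars.strip t0)
  -- the loop over text with chars / last_was_sep
  let r := text.foldl (fun (st : List Char × Bool) c =>
      if PySem.Chars.isalnum c then (st.1 ++ [c], false)
      else if st.2 then st else (st.1 ++ ['_'], true)) (([] : List Char), false)
  let compact := PySem.Chars.stripChars r.1 ['_']
  if compact = [] then default else String.ofList compact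

-- ===== PORT B =====
-- itertools.groupby(text, key=str.isalnum): maximal runs of equal key, in order
def pvRuns (cs : List Char) : List (Bool × List Char) :=
  match cs with
  | [] => []
  | c :: rest =>
    let k := PySem.Chars.isalnum c
    (k, c :: rest.takeWhile (fun d => PySem.Chars.isalnum d == k)) ::
      pvRuns (rest.dropWhile (fun d => PySem.Chars.isalnum d == k))
termination_by cs.length
decreasing_by
  simpa using Nat.lt_succ_of_le (List.length_dropWhile_le _ _)

def compact_category_py_alt (value : Option String) (default : String) : String :=
  let stripped : List Char :=
    match value with
    | none => []
    | some s => PySem.Chars.strip s.toList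
  let text := PySem.Chars.lower (PySem.Chars.strip (if stripped = [] then default.toList else stripped))
  let parts := (pvRuns text).map (fun g => if g.1 then g.2 else ['_'])
  let compact := PySem.Chars.stripChars parts.flatten ['_']
  if compact = [] then default else String.ofList compact

-- ===== PRECONDITION & SPEC =====
def Spec_compact_category_py (value : Option String) (default : String) (out : String) : Prop := out = compact_category_py_alt value default
instance (value : Option String) (default : String) (out : String) : Decidable (Spec_compact_category_py value default out) := by unfold Spec_compact_category_py; infer_instance

-- ===== CLAIM (what is proved, stated in full; the proofs are below) =====
def Claim_equal_compact_category_py : Prop := ∀ (value : Option String) (default : String), Dom_compact_category_py value default → Spec_compact_category_py value default (compact_category_py value default)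

-- ===== LEMMAS AND PROOFS =====

-- A's loop, as a structural recursion on the text (chars output / final flag)
def pvFA : Bool → List Char → List Char
  | _, [] => []
  | sep, c :: cs =>
    if PySem.Chars.isalnum c then c :: pvFA false cs
    else if sep then pvFA true cs else '_' :: pvFA true cs

def pvGA : Bool → List Char → Bool
  | sep, [] => sep
  | _, c :: cs => if PySem.Chars.isalnum c then pvGA false cs else pvGA true cs

theorem pvFoldl_eq (cs : List Char) : ∀ (acc : List Char) (sep : Bool),
    cs.foldl (fun (st : List Char × Bool) c =>
      if PySem.Chars.isalnum c then (st.1 ++ [c], false)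
      else if st.2 then st else (st.1 ++ ['_'], true)) (acc, sep)
    = (acc ++ pvFA sep cs, pvGA sep cs) := by
  induction cs with
  | nil => intro acc sep; simp [pvFA, pvGA]
  | cons c cs ih =>
    intro acc sep
    by_cases h : PySem.Chars.isalnum c
    · simp [pvFA, pvGA, h, ih]
    · cases sep <;> simp [pvFA, pvGA, h, ih]

theorem pvFA_alnum_run (run : List Char) (rest : List Char)
    (h : ∀ c ∈ run, PySem.Chars.isalnum c = true) :
    pvFA false (run ++ rest) = run ++ pvFA false rest := by
  induction run with
  | nil => simp
  | cons c run ih =>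
    have hc := h c (by simp)
    simp [pvFA, hc, ih (fun d hd => h d (by simp [hd]))]

theorem pvFA_sep_run (run : List Char) (rest : List Char)
    (h : ∀ c ∈ run, PySem.Chars.isalnum c = false) :
    pvFA true (run ++ rest) = pvFA true rest := by
  induction run with
  | nil => simp
  | cons c run ih =>
    have hc := h c (by simp)
    simp [pvFA, hc, ih (fun d hd => h d (by simp [hd]))]

theorem pvFA_true_eq_false (cs : List Char)
    (h : ∀ c cs', cs = c :: cs' → PySem.Chars.isalnum c = true) :
    pvFA true cs = pvFA false cs := by
  cases cs with
  | nil => rfl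
  | cons c cs' => simp [pvFA, h c cs' rfl]

theorem pvFA_eq_runs (cs : List Char) :
    pvFA false cs = ((pvRuns cs).map (fun g => if g.1 then g.2 else ['_'])).flatten := by
  induction hn : cs.length using Nat.strong_induction_on generalizing cs with
  | _ n ih =>
  cases cs with
  | nil => simp [pvRuns, pvFA]
  | cons c rest =>
    subst hn
    by_cases h : PySem.Chars.isalnum c
    · rw [pvRuns]
      simp only [h]
      have htk : ∀ d ∈ rest.takeWhile (fun d => PySem.Chars.isalnum d == true),
          PySem.Chars.isalnum d = true := by
        intro d hd
        simpa using List.mem_takeWhile_imp hd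
      have hdrop : ∀ d ds, rest.dropWhile (fun d => PySem.Chars.isalnum d == true) = d :: ds →
          PySem.Chars.isalnum d = false := by
        intro d ds hds
        have := List.head?_dropWhile_not (fun d => PySem.Chars.isalnum d == true) rest
        rw [hds] at this
        simpa using this
      have hsplit : rest = rest.takeWhile (fun d => PySem.Chars.isalnum d == true)
          ++ rest.dropWhile (fun d => PySem.Chars.isalnum d == true) :=
        (List.takeWhile_append_dropWhile).symm
      calc pvFA false (c :: rest)
          = c :: pvFA false rest := by simp [pvFA, h]
        _ = c :: pvFA false (rest.takeWhile (fun d => PySem.Chars.isalnum d == true)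
              ++ rest.dropWhile (fun d => PySem.Chars.isalnum d == true)) := by rw [← hsplit]
        _ = c :: (rest.takeWhile (fun d => PySem.Chars.isalnum d == true)
              ++ pvFA false (rest.dropWhile (fun d => PySem.Chars.isalnum d == true))) := by
              rw [pvFA_alnum_run _ _ htk]
        _ = _ := by
              rw [ih _ (by simpa using Nat.lt_succ_of_le (List.length_dropWhile_le _ _)) _ rfl]
              simp
    · rw [pvRuns]
      simp only [h]
      have hb : PySem.Chars.isalnum c = false := by simpa using h
      have htk : ∀ d ∈ rest.takeWhile (fun d => PySem.Chars.isalnum d == false),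
          PySem.Chars.isalnum d = false := by
        intro d hd
        simpa using List.mem_takeWhile_imp hd
      have hdrop : ∀ d ds, rest.dropWhile (fun d => PySem.Chars.isalnum d == false) = d :: ds →
          PySem.Chars.isalnum d = true := by
        intro d ds hds
        have := List.head?_dropWhile_not (fun d => PySem.Chars.isalnum d == false) rest
        rw [hds] at this
        simpa using this
      have hsplit : rest = rest.takeWhile (fun d => PySem.Chars.isalnum d == false)
          ++ rest.dropWhile (fun d => PySem.Chars.isalnum d == false) :=
        (List.takeWhile_append_dropWhile).symm
      calc pvFA false (c :: rest)
          = '_' :: pvFA true rest := by simp [pvFA, hb]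
        _ = '_' :: pvFA true (rest.takeWhile (fun d => PySem.Chars.isalnum d == false)
              ++ rest.dropWhile (fun d => PySem.Chars.isalnum d == false)) := by rw [← hsplit]
        _ = '_' :: pvFA true (rest.dropWhile (fun d => PySem.Chars.isalnum d == false)) := by
              rw [pvFA_sep_run _ _ htk]
        _ = '_' :: pvFA false (rest.dropWhile (fun d => PySem.Chars.isalnum d == false)) := by
              rw [pvFA_true_eq_false _ (hdrop)]
        _ = _ := by
              rw [ih _ (by simpa using Nat.lt_succ_of_le (List.length_dropWhile_le _ _)) _ rfl]
              simp

-- ===== VERDICT (by name: the statement is the Claim_ definition above) =====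
theorem compact_category_py_spec : Claim_equal_compact_category_py := by
  intro value default _
  unfold Spec_compact_category_py
  cases value with
  | none =>
      simp [compact_category_py, compact_category_py_alt, pvFoldl_eq, pvFA_eq_runs]
  | some s =>
      by_cases hs : PySem.Chars.strip s.toList = []
      · simp [compact_category_py, compact_category_py_alt, hs, pvFoldl_eq, pvFA_eq_runs]
      · simp [compact_category_py, compact_category_py_alt, hs, pvFoldl_eq, pvFA_eq_runs]
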